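-- pv_equiv track=rewrite | github.com/slobbe/advent-of-code | 2025/01/main.py | execute_rotations
-- ===== SOURCE A (Python) =====
-- def execute_rotations(starting_position: int, rotations):
--     dial_max: int = 99
--
--     if starting_position > dial_max:
--         return []
--
--     positions = [(starting_position, 0)]
--     for rotation in rotations:
--         current_position = positions[-1][0]
--         direction = rotation[0]
--         distance = rotation[1]
--         if direction == "L":
--             naive_end_position = current_position - distance
--             end_position = naive_end_position % (dial_max + 1)
--
--             full_rotations = distance // (dial_max + 1)
--             if (end_position > current_position) and (
--                 end_position != 0 and current_position != 0
--             ):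
--                 full_rotations += 1
--
--             positions.append((end_position, full_rotations))
--         elif direction == "R":
--             naive_end_position = current_position + distance
--             end_position = naive_end_position % (dial_max + 1)
--
--             full_rotations = distance // (dial_max + 1)
--             if (end_position < current_position) and (
--                 end_position != 0 and current_position != 0
--             ):
--                 full_rotations += 1
--
--             positions.append((end_position, full_rotations))
--         else:
--             return []
--
--     return positions
-- ===== SOURCE B (Python) =====
-- from itertools import accumulate
--
--
-- def execute_rotations(starting_position: int, rotations):
--     rotations = list(rotations)
--     if starting_position > 99 or any(r[0] not in ("L", "R") for r in rotations):
--         return []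
--
--     # closed form: position i is (start + signed prefix sum) % 100
--     deltas = [-r[1] if r[0] == "L" else r[1] for r in rotations]
--     sums = accumulate(deltas)
--     positions = [starting_position] + [(starting_position + s) % 100 for s in sums]
--
--     # full-rotation counts from consecutive position pairs, second staged pass
--     fulls = [0] + [
--         d // 100
--         + (1 if ((end > prev) if dir == "L" else (end < prev)) and end != 0 and prev != 0 else 0)
--         for (dir, d), prev, end in zip(rotations, positions, positions[1:])
--     ]
--     return list(zip(positions, fulls))
-- ===== Notes on version B (the rewrite author's own statement) =====
-- stated objective: alternative
-- what changed: Replaced A's stateful loop reading positions[-1] by a closed-form computation: positions are (start + prefix sum of signed distances) % 100 obtained from accumulate, and full-rotation counts are derived in a second pass from consecutive position pairs; validation is done up front since a bad direction anywhere makes A discard all state and return [].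
import Mathlib
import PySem

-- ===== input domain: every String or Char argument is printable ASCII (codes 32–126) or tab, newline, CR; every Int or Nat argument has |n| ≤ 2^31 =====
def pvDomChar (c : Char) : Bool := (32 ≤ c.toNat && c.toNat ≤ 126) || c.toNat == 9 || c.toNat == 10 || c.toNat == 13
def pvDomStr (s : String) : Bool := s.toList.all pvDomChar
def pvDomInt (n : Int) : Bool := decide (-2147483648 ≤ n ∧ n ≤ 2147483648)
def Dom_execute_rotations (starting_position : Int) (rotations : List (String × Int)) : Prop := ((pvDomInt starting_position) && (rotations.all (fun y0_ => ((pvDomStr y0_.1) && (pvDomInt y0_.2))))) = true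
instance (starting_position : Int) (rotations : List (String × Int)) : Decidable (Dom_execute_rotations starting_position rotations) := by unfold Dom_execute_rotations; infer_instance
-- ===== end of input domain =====

-- B computes positions in closed form ((start + signed prefix sum) % 100 via a scan of sums)
-- and derives full-rotation counts in a second pass over consecutive position pairs,
-- instead of A's stateful loop reading positions[-1]; alternative decomposition, same values.


-- ===== PORT A =====
-- the loop of A: positions is nonempty at every call, so positions[-1] = getLast?.getD (0,0) is exact
def execute_rotations_go (positions : List (Int × Int)) : List (String × Int) → List (Int × Int)
  | [] => positions
  | rotation :: rest =>
    let current_position := (positions.getLast?.getD (0, 0)).1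
    let direction := rotation.1
    let distance := rotation.2
    if direction == "L" then
      let naive_end_position := current_position - distance
      let end_position := PySem.Int.mod naive_end_position (99 + 1)
      let full_rotations := PySem.Int.floordiv distance (99 + 1)
      let full_rotations :=
        if end_position > current_position ∧ (end_position ≠ 0 ∧ current_position ≠ 0)
        then full_rotations + 1 else full_rotations
      execute_rotations_go (positions ++ [(end_position, full_rotations)]) rest
    else if direction == "R" then
      let naive_end_position := current_position + distance
      let end_position := PySem.Int.mod naive_end_position (99 + 1)
      let full_rotations := PySem.Int.floordiv distance (99 + 1)
      let full_rotations :=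
        if end_position < current_position ∧ (end_position ≠ 0 ∧ current_position ≠ 0)
        then full_rotations + 1 else full_rotations
      execute_rotations_go (positions ++ [(end_position, full_rotations)]) rest
    else []

def execute_rotations (starting_position : Int) (rotations : List (String × Int)) : List (Int × Int) :=
  if starting_position > 99 then []
  else execute_rotations_go [(starting_position, 0)] rotations

-- ===== PORT B =====
-- signed distance of one rotation (the comprehension building `deltas` in Source B)
def pvSigned (r : String × Int) : Int := if r.1 == "L" then -r.2 else r.2

-- full-rotation count of one rotation from the (rotation, (prev, end)) triple (Source B's second comprehension)
def pvFull (x : (String × Int) × (Int × Int)) : Int :=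
  let dir := x.1.1
  let d := x.1.2
  let prev := x.2.1
  let e := x.2.2
  PySem.Int.floordiv d 100 +
    (if (if dir == "L" then e > prev else e < prev) ∧ e ≠ 0 ∧ prev ≠ 0 then 1 else 0)

def execute_rotations_alt (starting_position : Int) (rotations : List (String × Int)) : List (Int × Int) :=
  if starting_position > 99 ∨ rotations.any (fun r => r.1 ≠ "L" ∧ r.1 ≠ "R") then []
  else
    -- itertools.accumulate (no initial) ported as scanl with 0 seed, tail dropped
    let sums := ((rotations.map pvSigned).scanl (· + ·) 0).tail
    let positions := starting_position :: sums.map (fun s => PySem.Int.mod (starting_position + s) 100)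
    let fulls := 0 :: (rotations.zip (positions.zip positions.tail)).map pvFull
    positions.zip fulls

-- ===== PRECONDITION & SPEC =====
def Spec_execute_rotations (starting_position : Int) (rotations : List (String × Int)) (out : List (Int × Int)) : Prop := out = execute_rotations_alt starting_position rotations
instance (starting_position : Int) (rotations : List (String × Int)) (out : List (Int × Int)) : Decidable (Spec_execute_rotations starting_position rotations out) := by unfold Spec_execute_rotations; infer_instance

-- ===== CLAIM (what is proved, stated in full; the proofs are below) =====
def Claim_equal_execute_rotations : Prop := ∀ (starting_position : Int) (rotations : List (String × Int)), Dom_execute_rotations starting_position rotations → Spec_execute_rotations starting_position rotations (execute_rotations starting_position rotations)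

-- ===== LEMMAS AND PROOFS =====

-- proof-only helper: the step of A's loop as a function on (position, fulls) pairs
def stepA (prev : Int × Int) (rotation : String × Int) : Int × Int :=
  let pos := prev.1
  let direction := rotation.1
  let distance := rotation.2
  let delta := if direction == "L" then -distance else distance
  let e := PySem.Int.mod (pos + delta) 100
  let full := PySem.Int.floordiv distance 100
  let wrapped := if direction == "L" then e > pos else e < pos
  if wrapped ∧ e ≠ 0 ∧ pos ≠ 0 then (e, full + 1) else (e, full)

-- proof-only helpers naming B's intermediate lists as functions of the start position
def posList (p : Int) (rots : List (String × Int)) : List Int :=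
  ((rots.map pvSigned).scanl (· + ·) 0).tail.map (fun s => PySem.Int.mod (p + s) 100)

def fullList (p : Int) (rots : List (String × Int)) : List Int :=
  (rots.zip ((p :: posList p rots).zip (posList p rots))).map pvFull

-- A's loop either hits a bad direction (returning []) or computes the scan of stepA
lemma execute_rotations_go_eq (rots : List (String × Int)) :
    ∀ (acc : List (Int × Int)) (p k : Int),
      execute_rotations_go (acc ++ [(p, k)]) rots =
        if rots.any (fun r => r.1 ≠ "L" ∧ r.1 ≠ "R") then []
        else acc ++ List.scanl stepA (p, k) rots := by
  induction rots with
  | nil => intro acc p k; simp [execute_rotations_go, List.scanl]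
  | cons r rest ih =>
    intro acc p k
    rcases hst : stepA (p, k) r with ⟨e, f⟩
    by_cases hL : r.1 = "L"
    · have h1 : execute_rotations_go (acc ++ [(p, k)]) (r :: rest) =
          execute_rotations_go ((acc ++ [(p, k)]) ++ [(e, f)]) rest := by
        rw [← hst]; simp [execute_rotations_go, hL, stepA,
          sub_eq_add_neg, apply_ite (fun x : Int => ((p + -r.2) % 100, x))]
      rw [h1, ih (acc ++ [(p, k)]) e f]
      simp only [List.scanl_cons, List.any_cons, hL]
      rw [show (decide (¬"L" = "L" ∧ ¬"L" = "R")) = false from by decide]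
      rw [Bool.false_or]; simp [hst]
    · by_cases hR : r.1 = "R"
      · have h1 : execute_rotations_go (acc ++ [(p, k)]) (r :: rest) =
            execute_rotations_go ((acc ++ [(p, k)]) ++ [(e, f)]) rest := by
          rw [← hst]; simp [execute_rotations_go, hR, stepA,
            apply_ite (fun x : Int => ((p + r.2) % 100, x))]
        rw [h1, ih (acc ++ [(p, k)]) e f]
        simp only [List.scanl_cons, List.any_cons, hR]
        rw [show (decide (¬"R" = "L" ∧ ¬"R" = "R")) = false from by decide]
        rw [Bool.false_or]; simp [hst]
      · simp [execute_rotations_go, hL, hR]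

-- shifting the seed of a sum scan = mapping the shift over the zero-seeded scan
lemma scanl_add_shift (ds : List Int) : ∀ c : Int,
    List.scanl (· + ·) c ds = (List.scanl (· + ·) 0 ds).map (fun s => c + s) := by
  induction ds with
  | nil => intro c; simp
  | cons d ds ih =>
    intro c
    rw [List.scanl_cons, List.scanl_cons, ih (c + d), ih (0 + d)]
    simp [List.map_map, add_assoc]

-- a sum scan starts with its seed
lemma scanl_zero_head (ds : List Int) :
    List.scanl (· + ·) (0 : Int) ds = 0 :: (List.scanl (· + ·) (0 : Int) ds).tail := by
  cases ds <;> simp [List.scanl_cons]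

lemma pymod_add_left (a s : Int) :
    PySem.Int.mod (PySem.Int.mod a 100 + s) 100 = PySem.Int.mod (a + s) 100 := by
  rw [PySem.Int.mod_eq_emod_of_pos (by norm_num), PySem.Int.mod_eq_emod_of_pos (by norm_num),
      PySem.Int.mod_eq_emod_of_pos (by norm_num)]
  conv_rhs => rw [Int.add_emod]
  rw [Int.add_emod, Int.emod_emod_of_dvd _ (dvd_refl 100)]

lemma posList_cons (p : Int) (r : String × Int) (rest : List (String × Int)) :
    posList p (r :: rest) =
      PySem.Int.mod (p + pvSigned r) 100 :: posList (PySem.Int.mod (p + pvSigned r) 100) rest := by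
  simp only [posList, List.map_cons, List.scanl_cons, List.tail_cons]
  rw [scanl_add_shift _ (0 + pvSigned r), scanl_zero_head (rest.map pvSigned)]
  simp only [List.map_cons, List.map_map, zero_add, add_zero]
  rw [List.cons_eq_cons]
  refine ⟨by ring_nf, ?_⟩
  apply List.map_congr_left
  intro s _
  rw [pymod_add_left (p + pvSigned r) s]
  simp only [Function.comp_apply, add_assoc]

-- the scan of A's step equals B's zipped closed-form lists
lemma scanl_stepA_eq (rots : List (String × Int)) : ∀ (p k : Int),
    List.scanl stepA (p, k) rots = (p, k) :: (posList p rots).zip (fullList p rots) := by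
  induction rots with
  | nil => intro p k; simp [List.scanl, posList, fullList]
  | cons r rest ih =>
    intro p k
    rcases hst : stepA (p, k) r with ⟨e, f⟩
    have he : e = PySem.Int.mod (p + pvSigned r) 100 := by
      have h2 := hst
      simp only [stepA, pvSigned] at h2 ⊢
      split_ifs at h2 <;> simp_all
    have hf : f = pvFull (r, (p, e)) := by
      have h2 := hst
      simp only [stepA] at h2
      by_cases hL : (r.1 == "L") = true
      · simp only [hL, if_true] at h2
        simp only [pvFull, hL, if_true]
        split_ifs at h2 with h
        · simp only [Prod.mk.injEq] at h2
          obtain ⟨he2, hf2⟩ := h2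
          subst he2; subst hf2
          rw [if_pos h]
        · simp only [Prod.mk.injEq] at h2
          obtain ⟨he2, hf2⟩ := h2
          subst he2; subst hf2
          rw [if_neg h]; simp
      · simp only [Bool.not_eq_true] at hL
        simp only [hL, Bool.false_eq_true, if_false] at h2
        simp only [pvFull, hL, Bool.false_eq_true, if_false]
        split_ifs at h2 with h
        · simp only [Prod.mk.injEq] at h2
          obtain ⟨he2, hf2⟩ := h2
          subst he2; subst hf2
          rw [if_pos h]
        · simp only [Prod.mk.injEq] at h2
          obtain ⟨he2, hf2⟩ := h2
          subst he2; subst hf2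
          rw [if_neg h]; simp
    have hpos : posList p (r :: rest) = e :: posList e rest := by
      rw [posList_cons, ← he]
    have hfull : fullList p (r :: rest) = f :: fullList e rest := by
      simp only [fullList, hpos, List.zip_cons_cons, List.map_cons]
      rw [← hf]
    rw [List.scanl_cons, hst, ih e f, hpos, hfull, List.zip_cons_cons]

-- ===== VERDICT (by name: the statement is the Claim_ definition above) =====
theorem execute_rotations_spec : Claim_equal_execute_rotations := by
  intro sp rots _
  unfold Spec_execute_rotations execute_rotations execute_rotations_alt
  by_cases hsp : sp > 99
  · simp [hsp]
  · rw [if_neg hsp]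
    have hgo := execute_rotations_go_eq rots [] sp 0
    simp only [List.nil_append] at hgo
    rw [hgo]
    by_cases hbad : (rots.any fun r => decide (r.1 ≠ "L" ∧ r.1 ≠ "R")) = true
    · rw [if_pos hbad, if_pos (Or.inr hbad)]
    · rw [if_neg hbad, if_neg (fun h => h.elim hsp hbad)]
      rw [scanl_stepA_eq]
      simp only [posList, fullList, List.zip_cons_cons, List.tail_cons]
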